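-- pv_equiv track=rewrite | github.com/ortizmauricio/Gomoku | neuralGomoku.py | generateMonomials
-- ===== SOURCE A (Python) =====
-- def generateMonomials(index):
-- 	monomials = []
-- 	#Calculate horizontal monomials
-- 	for i in range(4,-1,-1):
-- 		tmpMonomial = []
-- 		for j in range(0,5):
-- 			if index[1] - i + j>= 0 and index[1] - i + j < 19:
-- 				tmpMonomial.append((index[0],  index[1] - i + j))
-- 		if len(tmpMonomial) == 5:
-- 			monomials.append(tmpMonomial)
--
-- 	#Calculate vertifcal monomials
-- 	for i in range(4,-1,-1):
-- 		tmpMonomial = []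
-- 		for j in range(0,5):
-- 			if index[0] - i + j >= 0 and index[0] - i + j < 19:
-- 				tmpMonomial.append((index[0] - i + j, index[1]))
-- 		if len(tmpMonomial) == 5:
-- 			monomials.append(tmpMonomial)
--
-- 	#Calculate right diagonal monomials
-- 	for i in range(4,-1,-1):
-- 		tmpMonomial = []
-- 		for j in range(0,5):
-- 			if index[0] - i + j >= 0 and index[0] - i + j < 19 and index[1] - i + j >= 0 and index[1] - i + j < 19:
-- 				tmpMonomial.append((index[0] - i + j,index[1] - i + j))
-- 		if len(tmpMonomial) == 5:
-- 			monomials.append(tmpMonomial)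
--
-- 	#Calculate left diagonal monomials
-- 	for i in range(4,-1,-1):
-- 		tmpMonomial = []
-- 		for j in range(0,5):
-- 			if index[0] - i + j >= 0 and index[0] - i + j < 19 and index[1] + i - j >= 0 and index[1] + i - j < 19:
-- 				tmpMonomial.append((index[0] - i + j, index[1] + i - j))
-- 		if len(tmpMonomial) == 5:
-- 			monomials.append(tmpMonomial)
--
-- 	return monomials
-- ===== SOURCE B (Python) =====
-- def generateMonomials(index):
--     r, c = index
--     out = []
--     for dr, dc in ((0, 1), (1, 0), (1, 1), (1, -1)):
--         # closed-form interval of offsets i for which the whole window fits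
--         lo, hi = 0, 4
--         if dr == 1:
--             lo, hi = max(lo, r - 14), min(hi, r)
--         if dc == 1:
--             lo, hi = max(lo, c - 14), min(hi, c)
--         elif dc == -1:
--             lo, hi = max(lo, 4 - c), min(hi, 18 - c)
--         for i in range(hi, lo - 1, -1):
--             out.append([(r - (i - j) * dr, c - (i - j) * dc) for j in range(5)])
--     return out
-- ===== Notes on version B (the rewrite author's own statement) =====
-- stated objective: alternative
-- what changed: A builds each candidate window cell-by-cell with a per-cell bounds test and keeps it only if 5 cells survived; B computes, per direction, the closed-form interval [lo,hi] of valid window offsets with max/min arithmetic and emits each full segment directly, with no per-cell tests and no filtering.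
import Mathlib
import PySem

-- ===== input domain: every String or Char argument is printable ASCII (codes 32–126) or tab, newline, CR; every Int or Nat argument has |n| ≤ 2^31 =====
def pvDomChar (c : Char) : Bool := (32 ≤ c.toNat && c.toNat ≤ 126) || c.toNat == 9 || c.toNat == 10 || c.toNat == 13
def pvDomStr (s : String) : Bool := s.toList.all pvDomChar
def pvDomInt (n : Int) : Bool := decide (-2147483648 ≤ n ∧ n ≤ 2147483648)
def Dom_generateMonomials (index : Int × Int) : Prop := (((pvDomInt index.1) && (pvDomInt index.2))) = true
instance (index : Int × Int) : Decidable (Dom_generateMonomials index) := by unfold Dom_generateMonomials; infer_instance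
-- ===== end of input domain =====

-- B replaces A's cell-by-cell window construction (with per-cell bounds tests and a
-- "kept only if 5 cells survived" filter) by a closed-form min/max computation of the
-- interval of valid window offsets per direction; objective: alternative (same cost).

-- ===== PORT A =====
-- one candidate window: the inner `for j in range(0,5)` loop of the respective block
def aInnerH (index : Int × Int) (i : Int) : List (Int × Int) :=
  (PySem.List.pyRange 0 5 1).foldl (fun t j =>
    if index.2 - i + j ≥ 0 ∧ index.2 - i + j < 19 then t ++ [(index.1, index.2 - i + j)] else t) []

def aInnerV (index : Int × Int) (i : Int) : List (Int × Int) :=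
  (PySem.List.pyRange 0 5 1).foldl (fun t j =>
    if index.1 - i + j ≥ 0 ∧ index.1 - i + j < 19 then t ++ [(index.1 - i + j, index.2)] else t) []

def aInnerD (index : Int × Int) (i : Int) : List (Int × Int) :=
  (PySem.List.pyRange 0 5 1).foldl (fun t j =>
    if index.1 - i + j ≥ 0 ∧ index.1 - i + j < 19 ∧ index.2 - i + j ≥ 0 ∧ index.2 - i + j < 19 then
      t ++ [(index.1 - i + j, index.2 - i + j)] else t) []

def aInnerL (index : Int × Int) (i : Int) : List (Int × Int) :=
  (PySem.List.pyRange 0 5 1).foldl (fun t j =>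
    if index.1 - i + j ≥ 0 ∧ index.1 - i + j < 19 ∧ index.2 + i - j ≥ 0 ∧ index.2 + i - j < 19 then
      t ++ [(index.1 - i + j, index.2 + i - j)] else t) []

-- one iteration of the respective `for i in range(4,-1,-1)` loop
def aStepH (index : Int × Int) (m : List (List (Int × Int))) (i : Int) : List (List (Int × Int)) :=
  let tmp := aInnerH index i
  if tmp.length = 5 then m ++ [tmp] else m

def aStepV (index : Int × Int) (m : List (List (Int × Int))) (i : Int) : List (List (Int × Int)) :=
  let tmp := aInnerV index i
  if tmp.length = 5 then m ++ [tmp] else m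

def aStepD (index : Int × Int) (m : List (List (Int × Int))) (i : Int) : List (List (Int × Int)) :=
  let tmp := aInnerD index i
  if tmp.length = 5 then m ++ [tmp] else m

def aStepL (index : Int × Int) (m : List (List (Int × Int))) (i : Int) : List (List (Int × Int)) :=
  let tmp := aInnerL index i
  if tmp.length = 5 then m ++ [tmp] else m

def generateMonomials (index : Int × Int) : List (List (Int × Int)) :=
  let monomials : List (List (Int × Int)) := []
  let monomials := (PySem.List.pyRange 4 (-1) (-1)).foldl (aStepH index) monomials
  let monomials := (PySem.List.pyRange 4 (-1) (-1)).foldl (aStepV index) monomials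
  let monomials := (PySem.List.pyRange 4 (-1) (-1)).foldl (aStepD index) monomials
  (PySem.List.pyRange 4 (-1) (-1)).foldl (aStepL index) monomials

-- ===== PORT B =====
-- the list comprehension `[(r-(i-j)*dr, c-(i-j)*dc) for j in range(5)]`
def bSeg (r c dr dc i : Int) : List (Int × Int) :=
  (PySem.List.pyRange 0 5 1).map (fun j => (r - (i - j) * dr, c - (i - j) * dc))

-- body of the outer `for dr, dc in (...)` loop: closed-form offset interval, then emit
def bDir (r c : Int) (out : List (List (Int × Int))) (d : Int × Int) : List (List (Int × Int)) :=
  let dr := d.1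
  let dc := d.2
  let lh : Int × Int := (0, 4)
  let lh := if dr = 1 then (max lh.1 (r - 14), min lh.2 r) else lh
  let lh := if dc = 1 then (max lh.1 (c - 14), min lh.2 c)
            else if dc = -1 then (max lh.1 (4 - c), min lh.2 (18 - c)) else lh
  (PySem.List.pyRange lh.2 (lh.1 - 1) (-1)).foldl (fun out i => out ++ [bSeg r c dr dc i]) out

def generateMonomials_alt (index : Int × Int) : List (List (Int × Int)) :=
  [((0 : Int), (1 : Int)), (1, 0), (1, 1), (1, -1)].foldl (bDir index.1 index.2) []

-- ===== PRECONDITION & SPEC =====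
def Spec_generateMonomials (index : Int × Int) (out : List (List (Int × Int))) : Prop := out = generateMonomials_alt index
instance (index : Int × Int) (out : List (List (Int × Int))) : Decidable (Spec_generateMonomials index out) := by unfold Spec_generateMonomials; infer_instance

-- ===== CLAIM (what is proved, stated in full; the proofs are below) =====
def Claim_equal_generateMonomials : Prop := ∀ (index : Int × Int), Dom_generateMonomials index → Spec_generateMonomials index (generateMonomials index)

-- ===== LEMMAS AND PROOFS =====

-- canonical segments (both sides are reduced to these)
def segH (r c i : Int) : List (Int × Int) :=
  [(r, c - i), (r, c - i + 1), (r, c - i + 2), (r, c - i + 3), (r, c - i + 4)]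
def segV (r c i : Int) : List (Int × Int) :=
  [(r - i, c), (r - i + 1, c), (r - i + 2, c), (r - i + 3, c), (r - i + 4, c)]
def segD (r c i : Int) : List (Int × Int) :=
  [(r - i, c - i), (r - i + 1, c - i + 1), (r - i + 2, c - i + 2), (r - i + 3, c - i + 3), (r - i + 4, c - i + 4)]
def segL (r c i : Int) : List (Int × Int) :=
  [(r - i, c + i), (r - i + 1, c + i - 1), (r - i + 2, c + i - 2), (r - i + 3, c + i - 3), (r - i + 4, c + i - 4)]

theorem core (a b : Int) :
    (([4, 3, 2, 1, 0] : List Int).filter (fun i => decide (a ≤ i ∧ i ≤ b)))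
      = PySem.List.pyRange (min b 4) (max a 0 - 1) (-1) := by
  by_cases hab : max a 0 ≤ min b 4
  · generalize hA : max a 0 = A' at *
    generalize hB : min b 4 = B' at *
    have h0 : 0 ≤ A' := by omega
    have h4 : B' ≤ 4 := by omega
    have h0' : 0 ≤ B' := by omega
    have h4' : A' ≤ 4 := by omega
    interval_cases A' <;> interval_cases B' <;>
      · repeat first
          | rw [List.filter_cons_of_pos (by simp only [decide_eq_true_eq]; omega)]
          | rw [List.filter_cons_of_neg (by simp only [decide_eq_true_eq]; omega)]
        rw [List.filter_nil]
        decide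
  · rw [PySem.List.pyRange_neg_one_eq_nil (by omega)]
    repeat rw [List.filter_cons_of_neg (by simp only [decide_eq_true_eq]; omega)]
    rw [List.filter_nil]

-- the kept-window test: a five-cell filter build has length 5 only if cell 0 / cell 4 passed
theorem len_ne_five_head {p : Int → Prop} [DecidablePred p] (f : Int → Int × Int) (h : ¬ p 0) :
    ((([0, 1, 2, 3, 4] : List Int).filter (fun j => decide (p j))).map f).length ≠ 5 := by
  rw [List.filter_cons_of_neg (by simp [h])]
  have := List.length_filter_le (fun j => decide (p j)) ([1, 2, 3, 4] : List Int)
  simp only [List.length_map, List.length_cons, List.length_nil] at this ⊢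
  omega

theorem len_ne_five_last {p : Int → Prop} [DecidablePred p] (f : Int → Int × Int) (h : ¬ p 4) :
    ((([0, 1, 2, 3, 4] : List Int).filter (fun j => decide (p j))).map f).length ≠ 5 := by
  rw [show ([0, 1, 2, 3, 4] : List Int) = [0, 1, 2, 3] ++ [4] from rfl, List.filter_append,
      show List.filter (fun j => decide (p j)) [4] = [] from by simp [h], List.append_nil]
  have := List.length_filter_le (fun j => decide (p j)) ([0, 1, 2, 3] : List Int)
  simp only [List.length_map, List.length_cons, List.length_nil] at this ⊢
  omega

-- A-side step lemmas: each block of A is the canonical "keep i iff a ≤ i ≤ b" step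
theorem aStepH_eq (index : Int × Int) :
    aStepH index = fun m i =>
      if index.2 - 14 ≤ i ∧ i ≤ index.2 then m ++ [segH index.1 index.2 i] else m := by
  funext m i
  obtain ⟨r, c⟩ := index
  simp only [aStepH, aInnerH]
  rw [show PySem.List.pyRange 0 5 1 = ([0, 1, 2, 3, 4] : List Int) from by decide,
      PySem.List.foldl_append_ite]
  by_cases h : c - 14 ≤ i ∧ i ≤ c
  · rw [if_pos h]
    repeat rw [List.filter_cons_of_pos (by simp only [decide_eq_true_eq]; omega)]
    rw [List.filter_nil]
    simp only [List.map, List.nil_append, List.length_cons, List.length_nil]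
    rw [if_pos trivial]
    simp [segH]
  · rw [if_neg h]
    have hd : ¬ (c - i + 0 ≥ 0 ∧ c - i + 0 < 19) ∨ ¬ (c - i + 4 ≥ 0 ∧ c - i + 4 < 19) := by omega
    rcases hd with h1 | h1
    · rw [List.nil_append, if_neg (len_ne_five_head _ (by omega))]
    · rw [List.nil_append, if_neg (len_ne_five_last _ (by omega))]

theorem aStepV_eq (index : Int × Int) :
    aStepV index = fun m i =>
      if index.1 - 14 ≤ i ∧ i ≤ index.1 then m ++ [segV index.1 index.2 i] else m := by
  funext m i
  obtain ⟨r, c⟩ := index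
  simp only [aStepV, aInnerV]
  rw [show PySem.List.pyRange 0 5 1 = ([0, 1, 2, 3, 4] : List Int) from by decide,
      PySem.List.foldl_append_ite]
  by_cases h : r - 14 ≤ i ∧ i ≤ r
  · rw [if_pos h]
    repeat rw [List.filter_cons_of_pos (by simp only [decide_eq_true_eq]; omega)]
    rw [List.filter_nil]
    simp only [List.map, List.nil_append, List.length_cons, List.length_nil]
    rw [if_pos trivial]
    simp [segV]
  · rw [if_neg h]
    have hd : ¬ (r - i + 0 ≥ 0 ∧ r - i + 0 < 19) ∨ ¬ (r - i + 4 ≥ 0 ∧ r - i + 4 < 19) := by omega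
    rcases hd with h1 | h1
    · rw [List.nil_append, if_neg (len_ne_five_head _ (by omega))]
    · rw [List.nil_append, if_neg (len_ne_five_last _ (by omega))]

theorem aStepD_eq (index : Int × Int) :
    aStepD index = fun m i =>
      if max (index.1 - 14) (index.2 - 14) ≤ i ∧ i ≤ min index.1 index.2 then m ++ [segD index.1 index.2 i] else m := by
  funext m i
  obtain ⟨r, c⟩ := index
  simp only [aStepD, aInnerD]
  rw [show PySem.List.pyRange 0 5 1 = ([0, 1, 2, 3, 4] : List Int) from by decide,
      PySem.List.foldl_append_ite]
  by_cases h : max (r - 14) (c - 14) ≤ i ∧ i ≤ min r c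
  · rw [if_pos h]
    repeat rw [List.filter_cons_of_pos (by simp only [decide_eq_true_eq]; omega)]
    rw [List.filter_nil]
    simp only [List.map, List.nil_append, List.length_cons, List.length_nil]
    rw [if_pos trivial]
    simp [segD]
  · rw [if_neg h]
    have hd : ¬ (r - i + 0 ≥ 0 ∧ r - i + 0 < 19 ∧ c - i + 0 ≥ 0 ∧ c - i + 0 < 19) ∨ ¬ (r - i + 4 ≥ 0 ∧ r - i + 4 < 19 ∧ c - i + 4 ≥ 0 ∧ c - i + 4 < 19) := by omega
    rcases hd with h1 | h1
    · rw [List.nil_append, if_neg (len_ne_five_head _ (by omega))]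
    · rw [List.nil_append, if_neg (len_ne_five_last _ (by omega))]

theorem aStepL_eq (index : Int × Int) :
    aStepL index = fun m i =>
      if max (index.1 - 14) (4 - index.2) ≤ i ∧ i ≤ min index.1 (18 - index.2) then m ++ [segL index.1 index.2 i] else m := by
  funext m i
  obtain ⟨r, c⟩ := index
  simp only [aStepL, aInnerL]
  rw [show PySem.List.pyRange 0 5 1 = ([0, 1, 2, 3, 4] : List Int) from by decide,
      PySem.List.foldl_append_ite]
  by_cases h : max (r - 14) (4 - c) ≤ i ∧ i ≤ min r (18 - c)
  · rw [if_pos h]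
    repeat rw [List.filter_cons_of_pos (by simp only [decide_eq_true_eq]; omega)]
    rw [List.filter_nil]
    simp only [List.map, List.nil_append, List.length_cons, List.length_nil]
    rw [if_pos trivial]
    simp [segL]
  · rw [if_neg h]
    have hd : ¬ (r - i + 0 ≥ 0 ∧ r - i + 0 < 19 ∧ c + i - 0 ≥ 0 ∧ c + i - 0 < 19) ∨ ¬ (r - i + 4 ≥ 0 ∧ r - i + 4 < 19 ∧ c + i - 4 ≥ 0 ∧ c + i - 4 < 19) := by omega
    rcases hd with h1 | h1
    · rw [List.nil_append, if_neg (len_ne_five_head _ (by omega))]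
    · rw [List.nil_append, if_neg (len_ne_five_last _ (by omega))]

-- B-side: each direction's contribution in closed form
theorem bDirH_eq (r c : Int) (out : List (List (Int × Int))) :
    bDir r c out (0, 1)
      = out ++ (PySem.List.pyRange (min c 4) (max (c - 14) 0 - 1) (-1)).map (segH r c) := by
  have hseg : ∀ i : Int, bSeg r c 0 1 i = segH r c i := by
    intro i
    simp only [bSeg, segH,
      show PySem.List.pyRange 0 5 1 = ([0, 1, 2, 3, 4] : List Int) from by decide, List.map]
    simp only [List.cons.injEq, Prod.mk.injEq, and_true]
    omega
  simp only [bDir, reduceIte]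
  rw [PySem.List.foldl_append_singleton_eq_map]
  simp [hseg, min_comm, max_comm]

theorem bDirV_eq (r c : Int) (out : List (List (Int × Int))) :
    bDir r c out (1, 0)
      = out ++ (PySem.List.pyRange (min r 4) (max (r - 14) 0 - 1) (-1)).map (segV r c) := by
  have hseg : ∀ i : Int, bSeg r c 1 0 i = segV r c i := by
    intro i
    simp only [bSeg, segV,
      show PySem.List.pyRange 0 5 1 = ([0, 1, 2, 3, 4] : List Int) from by decide, List.map]
    simp only [List.cons.injEq, Prod.mk.injEq, and_true]
    omega
  simp only [bDir, reduceIte]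
  rw [PySem.List.foldl_append_singleton_eq_map]
  simp [hseg, min_comm, max_comm]

theorem bDirD_eq (r c : Int) (out : List (List (Int × Int))) :
    bDir r c out (1, 1)
      = out ++ (PySem.List.pyRange (min (min r c) 4) (max (max (r - 14) (c - 14)) 0 - 1) (-1)).map (segD r c) := by
  have hseg : ∀ i : Int, bSeg r c 1 1 i = segD r c i := by
    intro i
    simp only [bSeg, segD,
      show PySem.List.pyRange 0 5 1 = ([0, 1, 2, 3, 4] : List Int) from by decide, List.map]
    simp only [List.cons.injEq, Prod.mk.injEq, and_true]
    omega
  simp only [bDir, reduceIte]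
  rw [PySem.List.foldl_append_singleton_eq_map]
  simp [hseg, min_comm, max_comm, min_assoc, min_left_comm, max_left_comm]

theorem bDirL_eq (r c : Int) (out : List (List (Int × Int))) :
    bDir r c out (1, -1)
      = out ++ (PySem.List.pyRange (min (min r (18 - c)) 4) (max (max (r - 14) (4 - c)) 0 - 1) (-1)).map (segL r c) := by
  have hseg : ∀ i : Int, bSeg r c 1 (-1) i = segL r c i := by
    intro i
    simp only [bSeg, segL,
      show PySem.List.pyRange 0 5 1 = ([0, 1, 2, 3, 4] : List Int) from by decide, List.map]
    simp only [List.cons.injEq, Prod.mk.injEq, and_true]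
    omega
  simp only [bDir, reduceIte]
  rw [PySem.List.foldl_append_singleton_eq_map]
  simp [hseg, min_comm, max_comm, min_assoc, min_left_comm, max_left_comm]

-- ===== VERDICT (by name: the statement is the Claim_ definition above) =====
theorem generateMonomials_spec : Claim_equal_generateMonomials := by
  intro index _
  obtain ⟨r, c⟩ := index
  show generateMonomials (r, c) = generateMonomials_alt (r, c)
  unfold generateMonomials generateMonomials_alt
  rw [List.foldl_cons, List.foldl_cons, List.foldl_cons, List.foldl_cons, List.foldl_nil]
  rw [bDirH_eq, bDirV_eq, bDirD_eq, bDirL_eq]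
  rw [aStepH_eq, aStepV_eq, aStepD_eq, aStepL_eq]
  rw [show PySem.List.pyRange 4 (-1) (-1) = ([4, 3, 2, 1, 0] : List Int) from by decide]
  rw [PySem.List.foldl_append_ite, PySem.List.foldl_append_ite,
      PySem.List.foldl_append_ite, PySem.List.foldl_append_ite]
  rw [core, core, core, core]
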